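-- pv_equiv track=rewrite | github.com/klknet/geeks4geeks | datastructure/array/rearrange.py | reorder_index
-- ===== SOURCE A (Python) =====
-- def reorder_index(arr, idx):
--     """
--     Reorder an array according to given indexes.
--     :param arr:
--     :param idx:
--     :return:
--     """
--     i = 0
--     while i < len(arr):
--         if i != idx[i]:
--             i1 = i
--             i2 = idx[i]
--             arr[i1], arr[i2] = arr[i2], arr[i1]
--             idx[i1], idx[i2] = idx[i2], idx[i1]
--         else:
--             i += 1
--     return arr, idx
-- ===== SOURCE B (Python) =====
-- def reorder_index(arr, idx):
--     """
--     Reorder an array according to given indexes.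
--     :param arr:
--     :param idx:
--     :return:
--     """
--     n = len(arr)
--     result = [None] * n
--     for j in range(n):
--         result[idx[j]] = arr[j]
--     arr[:] = result
--     idx[:n] = range(n)
--     return arr, idx
-- ===== Notes on version B (the rewrite author's own statement) =====
-- stated objective: simpler
-- what changed: Replaces A's in-place cyclic-swap while-loop (which re-visits position i after each swap) by a single out-of-place scatter pass result[idx[j]] = arr[j] followed by a copy-back, writing the identity into idx[:n] directly.
-- outside the precondition, e.g. on reorder_index([5], [-1, 0]): A returns ([5], [0, -1]), B returns ([5], [0, 0])
import Mathlib
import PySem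

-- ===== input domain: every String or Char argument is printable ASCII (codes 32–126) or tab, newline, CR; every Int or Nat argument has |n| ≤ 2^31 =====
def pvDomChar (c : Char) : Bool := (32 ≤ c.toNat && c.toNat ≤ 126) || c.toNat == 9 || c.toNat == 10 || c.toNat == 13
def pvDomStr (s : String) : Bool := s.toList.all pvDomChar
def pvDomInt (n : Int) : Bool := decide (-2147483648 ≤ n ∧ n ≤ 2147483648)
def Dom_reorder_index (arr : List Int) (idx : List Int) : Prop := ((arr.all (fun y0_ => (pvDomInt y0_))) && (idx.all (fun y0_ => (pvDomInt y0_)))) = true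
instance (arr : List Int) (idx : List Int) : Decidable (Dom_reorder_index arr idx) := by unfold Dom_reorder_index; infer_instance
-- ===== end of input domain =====

-- B (simpler): replaces A's in-place cyclic-swap loop by one out-of-place scatter pass plus a
-- copy-back (both Pythons mutate arr and idx in place; the equivalence proved is about the return value).

-- ===== PORT A =====
-- A's while-loop may diverge outside Pre_ (duplicate/negative indices), so it is ported with fuel;
-- inside Pre_ the loop takes at most 2*n iterations (proved below), so the fuel is never exhausted.
-- Where Python would raise IndexError the total primitives pyGetD/pySetD are used; this is exact
-- under Pre_, where every index is in range.
def reorderLoop (fuel : Nat) (i : Nat) (arr idx : List Int) : List Int × List Int :=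
  match fuel with
  | 0 => (arr, idx)
  | fuel + 1 =>
    if i < arr.length then
      -- i2 = idx[i]
      let v := PySem.List.pyGetD idx (i : Int) 0
      if (i : Int) ≠ v then
        -- arr[i1], arr[i2] = arr[i2], arr[i1]
        let arr' := PySem.List.pySetD (PySem.List.pySetD arr (i : Int) (PySem.List.pyGetD arr v 0)) v (PySem.List.pyGetD arr (i : Int) 0)
        -- idx[i1], idx[i2] = idx[i2], idx[i1]
        let idx' := PySem.List.pySetD (PySem.List.pySetD idx (i : Int) (PySem.List.pyGetD idx v 0)) v (PySem.List.pyGetD idx (i : Int) 0)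
        reorderLoop fuel i arr' idx'
      else
        reorderLoop fuel (i + 1) arr idx
    else (arr, idx)

def reorder_index (arr : List Int) (idx : List Int) : List Int × List Int :=
  reorderLoop (2 * arr.length + 1) 0 arr idx

-- ===== PORT B =====
-- result = [None]*n is ported as a list of Int initialised with 0: under Pre_ (idx a permutation of
-- 0..n-1) every slot is overwritten, so the placeholder never survives; result[idx[j]] = arr[j] uses
-- the total pySetD/pyGetD, exact under Pre_ where j and idx[j] are in range.
def reorder_index_alt (arr : List Int) (idx : List Int) : List Int × List Int :=
  let n := arr.length
  let result := (List.range n).foldl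
    (fun (res : List Int) (j : Nat) => PySem.List.pySetD res (PySem.List.pyGetD idx (j : Int) 0) (PySem.List.pyGetD arr (j : Int) 0))
    (List.replicate n 0)
  -- idx[:n] = range(n)  (slice assignment: replaces the first n entries, keeps any tail)
  (result, (List.range n).map (fun (k : Nat) => (k : Int)) ++ idx.drop n)

-- ===== PRECONDITION & SPEC =====
-- Pre_ restricts to the function's natural domain: the first len(arr) entries of idx form a
-- permutation of 0..len(arr)-1 (the only entries the loop reads). Outside it A raises IndexError or
-- loops forever, except for rare prefixes with negative entries that happen to resolve through
-- Python's negative-index wraparound, where A's returned value is an accident of that wraparound.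
def Pre_reorder_index (arr : List Int) (idx : List Int) : Prop :=
  arr.length ≤ idx.length ∧
  (idx.take arr.length).Perm ((List.range arr.length).map (fun (k : Nat) => (k : Int)))
instance (arr : List Int) (idx : List Int) : Decidable (Pre_reorder_index arr idx) := by
  unfold Pre_reorder_index; infer_instance

def pvWitness_reorder_index : List Int × List Int := ([10, 20, 30], [2, 0, 1])

def Spec_reorder_index (arr : List Int) (idx : List Int) (out : List Int × List Int) : Prop := out = reorder_index_alt arr idx
instance (arr : List Int) (idx : List Int) (out : List Int × List Int) : Decidable (Spec_reorder_index arr idx out) := by unfold Spec_reorder_index; infer_instance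

-- ===== CLAIM (what is proved, stated in full; the proofs are below) =====
def Claim_equal_reorder_index : Prop := ∀ (arr : List Int) (idx : List Int), Dom_reorder_index arr idx → Pre_reorder_index arr idx → Spec_reorder_index arr idx (reorder_index arr idx)

-- ===== LEMMAS AND PROOFS =====

-- getD-level facts about List.set used by both sides (getD with default 0, indices Nat)
theorem pv_getD_set_self (l : List Int) (i : Nat) (v : Int) (h : i < l.length) :
    (l.set i v).getD i 0 = v := by
  have h' : i < (l.set i v).length := by simpa using h
  rw [List.getD_eq_getElem _ _ h']
  simp

theorem pv_getD_set_ne (l : List Int) (i j : Nat) (v : Int) (hij : i ≠ j) :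
    (l.set i v).getD j 0 = l.getD j 0 := by
  rcases lt_or_ge j l.length with h | h
  · rw [List.getD_eq_getElem _ _ (by simpa using h), List.getD_eq_getElem _ _ h]
    exact List.getElem_set_of_ne hij v _
  · rw [List.getD_eq_default _ _ (by simpa using h), List.getD_eq_default _ _ h]

theorem pv_pyGetD_toNat (xs : List Int) (v : Int) (h0 : 0 ≤ v) (h1 : v < (xs.length : Int)) :
    PySem.List.pyGetD xs v 0 = xs.getD v.toNat 0 := by
  rw [PySem.List.pyGetD_eq_getElem xs 0 h0 h1, List.getD_eq_getElem _ _ (by omega)]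

-- the simultaneous swap of positions i and k, read back through getD
theorem pv_getD_swap (l : List Int) (i k j : Nat) (hi : i < l.length) (hk : k < l.length)
    (hik : i ≠ k) :
    ((l.set i (l.getD k 0)).set k (l.getD i 0)).getD j 0 =
      l.getD (if j = i then k else if j = k then i else j) 0 := by
  by_cases hjk : j = k
  · subst hjk
    rw [if_neg (fun h => hik h.symm), if_pos rfl,
      pv_getD_set_self _ _ _ (by simpa using hk)]
  · rw [pv_getD_set_ne _ _ _ _ (fun h => hjk h.symm)]
    by_cases hji : j = i
    · subst hji; rw [if_pos rfl, pv_getD_set_self _ _ _ hi]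
    · rw [pv_getD_set_ne _ _ _ _ (fun h => hji h.symm), if_neg hji, if_neg hjk]

-- the loop invariant of A's while loop, relative to the final answer `ans` and the original `idx0`
def RInv (n i : Nat) (ans idx0 arr idx : List Int) : Prop :=
  arr.length = n ∧ idx.length = idx0.length ∧
  (∀ j, j < n → 0 ≤ idx.getD j 0 ∧ idx.getD j 0 < (n : Int)) ∧
  (∀ j1 j2, j1 < n → j2 < n → idx.getD j1 0 = idx.getD j2 0 → j1 = j2) ∧
  (∀ j, j < i → idx.getD j 0 = (j : Int)) ∧
  (∀ j, n ≤ j → idx.getD j 0 = idx0.getD j 0) ∧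
  (∀ j, j < n → ans.getD (idx.getD j 0).toNat 0 = arr.getD j 0)

-- positions ≥ i not yet fixed by the loop; the termination measure is (n - i) + its card
def unfixed (n i : Nat) (idx : List Int) : Finset Nat :=
  (Finset.range n).filter (fun j => i ≤ j ∧ idx.getD j 0 ≠ (j : Int))

-- one-step unfoldings of reorderLoop
theorem loop_step_done (m i : Nat) (arr idx : List Int) (h : ¬ i < arr.length) :
    reorderLoop (m + 1) i arr idx = (arr, idx) := by
  simp only [reorderLoop]
  rw [if_neg h]

theorem loop_step_incr (m i : Nat) (arr idx : List Int) (h : i < arr.length)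
    (hv : (i : Int) = idx.getD i 0) :
    reorderLoop (m + 1) i arr idx = reorderLoop m (i + 1) arr idx := by
  simp only [reorderLoop, PySem.List.pyGetD_natCast]
  rw [if_pos h, if_neg (by simpa using hv)]

theorem loop_step_swap (m i : Nat) (arr idx : List Int) (h : i < arr.length)
    (hv : (i : Int) ≠ idx.getD i 0) (h0 : 0 ≤ idx.getD i 0)
    (h1a : idx.getD i 0 < (arr.length : Int)) (h1i : idx.getD i 0 < (idx.length : Int)) :
    reorderLoop (m + 1) i arr idx =
      reorderLoop m i
        ((arr.set i (arr.getD (idx.getD i 0).toNat 0)).set (idx.getD i 0).toNat (arr.getD i 0))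
        ((idx.set i (idx.getD (idx.getD i 0).toNat 0)).set (idx.getD i 0).toNat (idx.getD i 0)) := by
  simp only [reorderLoop, PySem.List.pyGetD_natCast]
  rw [if_pos h, if_pos hv,
    pv_pyGetD_toNat arr _ h0 h1a, pv_pyGetD_toNat idx _ h0 h1i,
    PySem.List.pySetD_natCast, PySem.List.pySetD_natCast,
    PySem.List.pySetD_of_nonneg _ _ h0, PySem.List.pySetD_of_nonneg _ _ h0]

-- main loop lemma: under the invariant, with enough fuel, A's loop returns (ans, identity)
theorem loop_eq (n : Nat) (ans idx0 : List Int) (hans : ans.length = n)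
    (hn0 : n ≤ idx0.length) :
    ∀ (fuel i : Nat) (arr idx : List Int), RInv n i ans idx0 arr idx → i ≤ n →
      (n - i) + (unfixed n i idx).card < fuel →
      reorderLoop fuel i arr idx =
        (ans, (List.range n).map (fun (k : Nat) => (k : Int)) ++ idx0.drop n) := by
  intro fuel
  induction fuel with
  | zero => intro i arr idx _ _ h; omega
  | succ m ih =>
    intro i arr idx hinv hin hfuel
    obtain ⟨ha, hil, hbnd, hinj, hpre, htail, hpair⟩ := hinv
    by_cases hlt : i < arr.length
    · have hin' : i < n := by omega
      by_cases hv : (i : Int) = idx.getD i 0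
      · -- else-branch of A: i += 1
        rw [loop_step_incr m i arr idx hlt hv]
        have hcard : unfixed n (i + 1) idx = unfixed n i idx := by
          unfold unfixed
          refine Finset.filter_congr ?_
          intro j hj
          constructor
          · rintro ⟨h1, h2⟩; exact ⟨by omega, h2⟩
          · rintro ⟨h1, h2⟩
            refine ⟨?_, h2⟩
            rcases Nat.eq_or_lt_of_le h1 with h'' | h''
            · exfalso; exact h2 (by rw [← h'']; exact hv.symm)
            · omega
        apply ih (i + 1) arr idx
          ⟨ha, hil, hbnd, hinj, ?_, htail, hpair⟩ (by omega) (by rw [hcard]; omega)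
        intro j hj
        rcases Nat.lt_succ_iff_lt_or_eq.mp hj with h'' | h''
        · exact hpre j h''
        · subst h''; exact hv.symm
      · -- swap branch of A
        obtain ⟨h0, h1⟩ := hbnd i hin'
        have hk : (idx.getD i 0).toNat < n := by omega
        have hkInt : ((idx.getD i 0).toNat : Int) = idx.getD i 0 := by omega
        have hki : (idx.getD i 0).toNat ≠ i := by omega
        have hik : ¬ (idx.getD i 0).toNat < i := by
          intro hlt'
          have he : idx.getD ((idx.getD i 0).toNat) 0 = idx.getD i 0 := by
            rw [hpre _ hlt', hkInt]
          exact hki (hinj _ i hk hin' he)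
        rw [loop_step_swap m i arr idx hlt hv h0 (by omega) (by omega)]
        have hidx2 : ∀ j,
            ((idx.set i (idx.getD (idx.getD i 0).toNat 0)).set (idx.getD i 0).toNat
              (idx.getD i 0)).getD j 0 =
            idx.getD (if j = i then (idx.getD i 0).toNat
              else if j = (idx.getD i 0).toNat then i else j) 0 := by
          intro j
          exact pv_getD_swap idx i (idx.getD i 0).toNat j (by omega) (by omega)
            (fun h => hki (Eq.symm h))
        have harr2 : ∀ j,
            ((arr.set i (arr.getD (idx.getD i 0).toNat 0)).set (idx.getD i 0).toNat
              (arr.getD i 0)).getD j 0 =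
            arr.getD (if j = i then (idx.getD i 0).toNat
              else if j = (idx.getD i 0).toNat then i else j) 0 := fun j =>
          pv_getD_swap arr i (idx.getD i 0).toNat j (by omega) (by omega)
            (fun h => hki (Eq.symm h))
        have hsig : ∀ j, j < n →
            (if j = i then (idx.getD i 0).toNat
              else if j = (idx.getD i 0).toNat then i else j) < n := by
          intro j hj; split_ifs <;> omega
        have hsub : unfixed n i ((idx.set i (idx.getD (idx.getD i 0).toNat 0)).set
            (idx.getD i 0).toNat (idx.getD i 0)) ⊂ unfixed n i idx := by
          rw [Finset.ssubset_iff_of_subset]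
          · refine ⟨(idx.getD i 0).toNat, ?_, ?_⟩
            · simp only [unfixed, Finset.mem_filter, Finset.mem_range]
              refine ⟨hk, by omega, ?_⟩
              intro he
              exact hki (hinj _ i hk hin' (by rw [he, hkInt]))
            · simp only [unfixed, Finset.mem_filter, Finset.mem_range, not_and, not_not]
              intro _ _
              rw [hidx2, if_neg hki, if_pos rfl, hkInt]
          · intro j hj
            simp only [unfixed, Finset.mem_filter, Finset.mem_range] at hj ⊢
            obtain ⟨hjn, hij, hne⟩ := hj
            rw [hidx2] at hne
            by_cases hji : j = i
            · subst hji
              exact ⟨hjn, hij, fun h => hv h.symm⟩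
            · by_cases hjk : j = (idx.getD i 0).toNat
              · exfalso
                rw [if_neg hji, if_pos hjk] at hne
                subst hjk
                exact hne (by rw [hpre i ?_] <;> omega)
              · rw [if_neg hji, if_neg hjk] at hne
                exact ⟨hjn, hij, hne⟩
        apply ih i _ _ ?_ hin ?_
        · refine ⟨by simp [List.length_set, ha], by simp [List.length_set, hil], ?_, ?_, ?_, ?_, ?_⟩
          · intro j hj; rw [hidx2]; exact hbnd _ (hsig j hj)
          · intro j1 j2 hj1 hj2 he
            rw [hidx2, hidx2] at he
            have hs := hinj _ _ (hsig j1 hj1) (hsig j2 hj2) he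
            split_ifs at hs <;> omega
          · intro j hj
            rw [hidx2, if_neg (by omega), if_neg (by omega)]
            exact hpre j hj
          · intro j hj
            rw [hidx2, if_neg (by omega), if_neg (by omega)]
            exact htail j hj
          · intro j hj
            rw [hidx2, harr2]
            exact hpair _ (hsig j hj)
        · have := Finset.card_lt_card hsub
          omega
    · -- loop done: i = n, idx is the identity and arr is ans
      rw [loop_step_done m i arr idx hlt]
      have hin' : i = n := by omega
      have harr : arr = ans := by
        refine List.ext_getElem (by omega) ?_
        intro j hj1 hj2
        have hjn : j < n := by omega
        have hp := hpair j hjn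
        rw [hpre j (by omega)] at hp
        simp only [Int.toNat_natCast] at hp
        rw [List.getD_eq_getElem _ _ (by omega), List.getD_eq_getElem _ _ (by omega)] at hp
        exact hp.symm
      have hidx : idx = (List.range n).map (fun (k : Nat) => (k : Int)) ++ idx0.drop n := by
        refine List.ext_getElem ?_ ?_
        · simp only [List.length_append, List.length_map, List.length_range, List.length_drop]
          omega
        · intro j hj1 hj2
          by_cases hjn : j < n
          · rw [List.getElem_append_left (by simpa using hjn)]
            have hp := hpre j (by omega)
            rw [List.getD_eq_getElem _ _ hj1] at hp
            simp only [List.getElem_map, List.getElem_range]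
            exact hp
          · rw [List.getElem_append_right (by simpa using hjn)]
            have ht := htail j (by omega)
            rw [List.getD_eq_getElem _ _ hj1, List.getD_eq_getElem _ _ (by omega)] at ht
            rw [ht]
            simp only [List.length_map, List.length_range, List.getElem_drop]
            congr 1
            omega
      rw [harr, hidx]

-- B's scatter pass characterised: it has length n and realises ans[idx[j]] = arr[j]
theorem scatter_aux (n : Nat) (arr idx : List Int)
    (hbnd : ∀ j, j < n → 0 ≤ idx.getD j 0 ∧ idx.getD j 0 < (n : Int))
    (hinj : ∀ j1 j2, j1 < n → j2 < n → idx.getD j1 0 = idx.getD j2 0 → j1 = j2) :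
    ∀ m, m ≤ n →
      ((List.range m).foldl
        (fun (res : List Int) (j : Nat) => PySem.List.pySetD res (PySem.List.pyGetD idx (j : Int) 0)
          (PySem.List.pyGetD arr (j : Int) 0)) (List.replicate n 0)).length = n ∧
      ∀ j, j < m →
        ((List.range m).foldl
          (fun (res : List Int) (j : Nat) => PySem.List.pySetD res (PySem.List.pyGetD idx (j : Int) 0)
            (PySem.List.pyGetD arr (j : Int) 0)) (List.replicate n 0)).getD
          (idx.getD j 0).toNat 0 = arr.getD j 0 := by
  intro m
  induction m with
  | zero =>
    intro _
    refine ⟨by simp, ?_⟩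
    intro j hj; omega
  | succ m ih =>
    intro hm
    obtain ⟨ihl, ihg⟩ := ih (by omega)
    obtain ⟨h0m, h1m⟩ := hbnd m (by omega)
    have hkm : (idx.getD m 0).toNat < n := by omega
    rw [List.range_succ, List.foldl_append]
    simp only [List.foldl_cons, List.foldl_nil]
    rw [PySem.List.pyGetD_natCast idx m, PySem.List.pyGetD_natCast arr m,
      PySem.List.pySetD_of_nonneg _ _ h0m]
    refine ⟨by rw [List.length_set]; exact ihl, ?_⟩
    intro j hj
    rcases Nat.lt_succ_iff_lt_or_eq.mp hj with h' | h'
    · have hne : (idx.getD m 0).toNat ≠ (idx.getD j 0).toNat := by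
        intro he
        obtain ⟨h0j, _⟩ := hbnd j (by omega)
        have hmj : idx.getD m 0 = idx.getD j 0 := by omega
        exact absurd (hinj m j (by omega) (by omega) hmj) (by omega)
      rw [pv_getD_set_ne _ _ _ _ hne]
      exact ihg j h'
    · subst h'
      exact pv_getD_set_self _ _ _ (by omega)

-- B's port, unfolded to the scatter fold and the identity index list
theorem alt_eq (arr idx : List Int) :
    reorder_index_alt arr idx =
      ((List.range arr.length).foldl
        (fun (res : List Int) (j : Nat) => PySem.List.pySetD res (PySem.List.pyGetD idx (j : Int) 0)
          (PySem.List.pyGetD arr (j : Int) 0)) (List.replicate arr.length 0),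
       (List.range arr.length).map (fun (k : Nat) => (k : Int)) ++ idx.drop arr.length) := rfl

-- ===== VERDICT (by name: the statement is the Claim_ definition above) =====
theorem reorder_index_spec : Claim_equal_reorder_index := by
  intro arr idx _ hpre
  obtain ⟨hle, hperm⟩ := hpre
  unfold Spec_reorder_index
  have hgdtake : ∀ j, j < arr.length → (idx.take arr.length).getD j 0 = idx.getD j 0 := by
    intro j hj
    rw [List.getD_eq_getElem _ _ (by simp; omega), List.getD_eq_getElem _ _ (by omega)]
    exact List.getElem_take
  have hmem : ∀ x ∈ idx.take arr.length, 0 ≤ x ∧ x < (arr.length : Int) := by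
    intro x hx
    have hx' := hperm.mem_iff.mp hx
    simp only [List.mem_map] at hx'
    obtain ⟨k, hk, rfl⟩ := hx'
    have hk' : k < arr.length := List.mem_range.mp hk
    omega
  have hbnd : ∀ j, j < arr.length → 0 ≤ idx.getD j 0 ∧ idx.getD j 0 < (arr.length : Int) := by
    intro j hj
    rw [← hgdtake j hj]
    rw [List.getD_eq_getElem _ _ (by simp; omega)]
    exact hmem _ (List.getElem_mem _)
  have hnd : (idx.take arr.length).Nodup := by
    refine hperm.nodup_iff.mpr ?_
    refine List.Nodup.map ?_ List.nodup_range
    intro a b hab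
    have hab' : (a : Int) = (b : Int) := hab
    exact_mod_cast hab'
  have hinj : ∀ j1 j2, j1 < arr.length → j2 < arr.length →
      idx.getD j1 0 = idx.getD j2 0 → j1 = j2 := by
    intro j1 j2 h1 h2 h
    rw [← hgdtake j1 h1, ← hgdtake j2 h2] at h
    rw [List.getD_eq_getElem _ _ (by simp; omega), List.getD_eq_getElem _ _ (by simp; omega)] at h
    exact (hnd.getElem_inj_iff).mp h
  obtain ⟨hsl, hsg⟩ := scatter_aux arr.length arr idx hbnd hinj arr.length le_rfl
  rw [alt_eq]
  unfold reorder_index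
  apply loop_eq arr.length _ idx hsl hle (2 * arr.length + 1) 0 arr idx
    ⟨rfl, rfl, hbnd, hinj, fun j hj => absurd hj (by omega), fun j _ => rfl, hsg⟩ (by omega)
  have : (unfixed arr.length 0 idx).card ≤ arr.length := by
    calc (unfixed arr.length 0 idx).card ≤ (Finset.range arr.length).card :=
          Finset.card_filter_le _ _
      _ = arr.length := Finset.card_range _
  omega
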